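-- pv_equiv track=rewrite | github.com/TinoFP/PIA | PIA1/PIA1.T1_problema1.py | separar_listas
-- ===== SOURCE A (Python) =====
-- def separar_listas (lista):
--     num_positivos = []
--     num_negativos = []
--     for num in lista:
--         if num < 0:
--             num_negativos.append(num)
--         else:
--             num_positivos.append(num)
--
--     num_positivos.sort()
--     num_negativos.sort()
--
--     # Devuelve las 2 listas
--     return num_negativos, num_positivos
-- ===== SOURCE B (Python) =====
-- def separar_listas(lista):
--     # Sort once, then split the single sorted list at the first non-negative.
--     ordenada = sorted(lista)
--     k = 0
--     for x in ordenada: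
--         if x < 0:
--             k += 1
--     return ordenada[:k], ordenada[k:]
-- ===== Notes on version B (the rewrite author's own statement) =====
-- stated objective: alternative
-- what changed: B sorts the whole list once and then splits the sorted copy at the count of negatives, instead of A's partition-into-two-lists followed by two separate sorts.
import Mathlib
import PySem

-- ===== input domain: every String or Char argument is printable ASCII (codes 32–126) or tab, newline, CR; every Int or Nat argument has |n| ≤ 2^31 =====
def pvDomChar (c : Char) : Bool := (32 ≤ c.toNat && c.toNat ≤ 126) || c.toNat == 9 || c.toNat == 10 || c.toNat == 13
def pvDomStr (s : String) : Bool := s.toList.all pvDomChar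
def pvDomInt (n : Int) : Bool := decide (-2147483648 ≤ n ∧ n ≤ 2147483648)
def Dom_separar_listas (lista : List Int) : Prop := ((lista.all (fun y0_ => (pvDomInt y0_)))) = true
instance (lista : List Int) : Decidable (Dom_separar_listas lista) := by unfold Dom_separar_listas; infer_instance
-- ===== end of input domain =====

-- B sorts the whole list once and then splits the sorted copy at the count of
-- negatives, instead of A's partition-into-two-lists followed by two sorts
-- (objective: alternative decomposition, same asymptotic cost).

-- ===== PORT A =====
def separar_listas (lista : List Int) : List Int × List Int :=
  -- (num_positivos, num_negativos) accumulated by the for-loop, then each .sort()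
  let st := lista.foldl
    (fun (acc : List Int × List Int) num =>
      if num < 0 then (acc.1, acc.2 ++ [num]) else (acc.1 ++ [num], acc.2))
    ([], [])
  (PySem.List.sorted st.2 (fun x => x) false, PySem.List.sorted st.1 (fun x => x) false)

-- ===== PORT B =====
def separar_listas_alt (lista : List Int) : List Int × List Int :=
  let ordenada := PySem.List.sorted lista (fun x => x) false
  let k : Int := ordenada.foldl (fun k x => if x < 0 then k + 1 else k) 0
  (PySem.List.slice ordenada none (some k), PySem.List.slice ordenada (some k) none)

-- ===== PRECONDITION & SPEC =====
def Spec_separar_listas (lista : List Int) (out : List Int × List Int) : Prop := out = separar_listas_alt lista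
instance (lista : List Int) (out : List Int × List Int) : Decidable (Spec_separar_listas lista out) := by unfold Spec_separar_listas; infer_instance

-- ===== CLAIM (what is proved, stated in full; the proofs are below) =====
def Claim_equal_separar_listas : Prop := ∀ (lista : List Int), Dom_separar_listas lista → Spec_separar_listas lista (separar_listas lista)

-- ===== LEMMAS AND PROOFS =====

-- A's loop is the two filters, appended to the running accumulators.
theorem sep_foldl_eq (l pos neg : List Int) :
    l.foldl
      (fun (acc : List Int × List Int) num =>
        if num < 0 then (acc.1, acc.2 ++ [num]) else (acc.1 ++ [num], acc.2))
      (pos, neg)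
    = (pos ++ l.filter (fun x => !decide (x < 0)),
       neg ++ l.filter (fun x => decide (x < 0))) := by
  induction l generalizing pos neg with
  | nil => simp
  | cons a t ih =>
    by_cases h : a < 0 <;> simp [List.foldl_cons, h, ih, List.append_assoc]

-- B's counting loop is countP.
theorem count_foldl_eq (l : List Int) (k : Int) :
    l.foldl (fun k x => if x < 0 then k + 1 else k) k
      = k + (l.countP (fun x => decide (x < 0)) : Int) := by
  induction l generalizing k with
  | nil => simp
  | cons a t ih =>
    by_cases h : a < 0
    · simp [List.foldl_cons, h, ih]
      ring
    · simp [List.foldl_cons, h, ih]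

-- The single sorted list is the sorted negatives followed by the sorted rest.
theorem sorted_split (l : List Int) :
    PySem.List.sorted l (fun x => x) false
      = PySem.List.sorted (l.filter (fun x => decide (x < 0))) (fun x => x) false
        ++ PySem.List.sorted (l.filter (fun x => !decide (x < 0))) (fun x => x) false := by
  apply PySem.List.sorted_id_eq_of_perm_of_pairwise
  · exact ((PySem.List.sorted_perm _ _ _).append (PySem.List.sorted_perm _ _ _)).trans
      (List.filter_append_perm _ l)
  · rw [List.pairwise_append]
    refine ⟨PySem.List.sorted_pairwise _ _, PySem.List.sorted_pairwise _ _, ?_⟩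
    intro a ha b hb
    rw [PySem.List.mem_sorted, List.mem_filter] at ha hb
    have h1 : a < 0 := by simpa using ha.2
    have h2 : ¬ b < 0 := by simpa using hb.2
    omega

-- Every element of the sorted-negatives block is negative, none of the rest is.
theorem countP_sorted_neg (l : List Int) :
    (PySem.List.sorted (l.filter (fun x => decide (x < 0))) (fun x => x) false).countP
        (fun x => decide (x < 0))
      = (PySem.List.sorted (l.filter (fun x => decide (x < 0))) (fun x => x) false).length := by
  apply List.countP_eq_length.mpr
  intro a ha
  rw [PySem.List.mem_sorted, List.mem_filter] at ha
  exact ha.2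

theorem countP_sorted_nonneg (l : List Int) :
    (PySem.List.sorted (l.filter (fun x => !decide (x < 0))) (fun x => x) false).countP
        (fun x => decide (x < 0)) = 0 := by
  apply List.countP_eq_zero.mpr
  intro a ha
  rw [PySem.List.mem_sorted, List.mem_filter] at ha
  simpa using ha.2

-- ===== VERDICT (by name: the statement is the Claim_ definition above) =====
theorem separar_listas_spec : Claim_equal_separar_listas := by
  intro lista _
  unfold Spec_separar_listas separar_listas separar_listas_alt
  simp only [sep_foldl_eq, List.nil_append, count_foldl_eq, Int.zero_add]
  set neg := PySem.List.sorted (lista.filter (fun x => decide (x < 0))) (fun x => x) false with hneg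
  set pos := PySem.List.sorted (lista.filter (fun x => !decide (x < 0))) (fun x => x) false with hpos
  rw [sorted_split lista]
  have hcount : ((neg ++ pos).countP (fun x => decide (x < 0)) : Int) = (neg.length : Int) := by
    rw [List.countP_append, countP_sorted_neg, countP_sorted_nonneg]
    simp [hneg, PySem.List.length_sorted]
  rw [hcount, PySem.List.slice_to _ (by positivity), PySem.List.slice_from _ (by positivity)]
  simp [← hneg, ← hpos, List.take_left', List.drop_left']
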